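-- pv_equiv track=rewrite | github.com/dmurfet/deeplinearlogic | snapshots/ntm-v3/learnfuncs.py | f_repetitionpattern
-- ===== SOURCE A (Python) =====
-- def f_repetitionpattern(seq, pattern):
--     t = []
--     i = 0
--     j = 0
--     while(len(t) < 2*len(seq)):
--         t.append(seq[j % len(seq)])
--         j = j + pattern[i % len(pattern)]
--         i = i + 1
--     return t
-- ===== SOURCE B (Python) =====
-- def f_repetitionpattern(seq, pattern):
--     n = len(seq)
--     if n == 0:
--         return []
--     m = len(pattern)
--     prefix = [0]
--     for p in pattern:
--         prefix.append(prefix[-1] + p)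
--     total = prefix[m]
--     return [seq[(k // m * total + prefix[k % m]) % n] for k in range(2 * n)]
-- ===== Notes on version B (the rewrite author's own statement) =====
-- stated objective: alternative
-- what changed: B replaces A's sequential running-sum loop over all 2n output positions by a closed form: it precomputes the prefix sums of ONE pattern period plus the period total, then computes each position's offset independently as k//m*total + prefix[k%m] (no offset is carried from one position to the next).
import Mathlib
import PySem

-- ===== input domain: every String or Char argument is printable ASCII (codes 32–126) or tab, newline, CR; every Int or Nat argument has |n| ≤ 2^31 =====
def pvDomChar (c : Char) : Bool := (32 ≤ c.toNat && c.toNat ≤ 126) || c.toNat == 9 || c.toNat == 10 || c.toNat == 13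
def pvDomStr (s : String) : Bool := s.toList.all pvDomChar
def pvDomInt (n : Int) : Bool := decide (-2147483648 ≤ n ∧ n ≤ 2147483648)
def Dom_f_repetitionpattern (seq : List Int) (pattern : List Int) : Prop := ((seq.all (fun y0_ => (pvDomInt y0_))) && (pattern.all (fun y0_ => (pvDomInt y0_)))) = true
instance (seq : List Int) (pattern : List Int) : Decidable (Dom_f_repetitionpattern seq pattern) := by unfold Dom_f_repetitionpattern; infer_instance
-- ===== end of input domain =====

-- B computes each output position's offset in closed form (k//m * period-total + one-period prefix
-- sum at k%m) instead of A's sequential running sum carried across all 2n positions; same cost,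
-- genuinely different decomposition (per-position closed form vs threaded accumulator).

-- ===== PORT A =====
-- while loop of A: fuel = number of remaining appends (2*len(seq) - len(t)); state (t, i, j)
def f_repetitionpattern_go (seq : List Int) (pattern : List Int) :
    Nat → List Int → Int → Int → List Int
  | 0, t, _, _ => t
  | k+1, t, i, j =>
    let x := (PySem.List.pyGet? seq (PySem.Int.mod j (seq.length : Int))).getD 0
    let p := (PySem.List.pyGet? pattern (PySem.Int.mod i (pattern.length : Int))).getD 0
    f_repetitionpattern_go seq pattern k (t ++ [x]) (i + 1) (j + p)

def f_repetitionpattern (seq : List Int) (pattern : List Int) : List Int :=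
  f_repetitionpattern_go seq pattern (2 * seq.length) [] 0 0

-- ===== PORT B =====
def f_repetitionpattern_alt (seq : List Int) (pattern : List Int) : List Int :=
  let n := seq.length
  if n = 0 then []
  else
    let m := pattern.length
    let pre := pattern.foldl
      (fun acc p => acc ++ [(PySem.List.pyGet? acc (-1)).getD 0 + p]) [0]
    let total := (PySem.List.pyGet? pre (m : Int)).getD 0
    (PySem.List.pyRange 0 (2 * n) 1).map (fun k =>
      (PySem.List.pyGet? seq (PySem.Int.mod
        (PySem.Int.floordiv k (m : Int) * total +
         (PySem.List.pyGet? pre (PySem.Int.mod k (m : Int))).getD 0)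
        (n : Int))).getD 0)

-- ===== PRECONDITION & SPEC =====
-- Pre_ excludes exactly the inputs where Python A raises ZeroDivisionError:
-- seq nonempty with pattern empty (the loop computes i % len(pattern)).
def Pre_f_repetitionpattern (seq : List Int) (pattern : List Int) : Prop :=
  seq = [] ∨ pattern ≠ []
instance (seq : List Int) (pattern : List Int) : Decidable (Pre_f_repetitionpattern seq pattern) := by
  unfold Pre_f_repetitionpattern; infer_instance

def pvWitness_f_repetitionpattern : List Int × List Int := ([1, 2, 3], [2, 1])

def Spec_f_repetitionpattern (seq : List Int) (pattern : List Int) (out : List Int) : Prop :=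
  out = f_repetitionpattern_alt seq pattern
instance (seq : List Int) (pattern : List Int) (out : List Int) :
    Decidable (Spec_f_repetitionpattern seq pattern out) := by
  unfold Spec_f_repetitionpattern; infer_instance

-- ===== CLAIM (what is proved, stated in full; the proofs are below) =====
def Claim_equal_f_repetitionpattern : Prop := ∀ (seq : List Int) (pattern : List Int), Dom_f_repetitionpattern seq pattern → Pre_f_repetitionpattern seq pattern → Spec_f_repetitionpattern seq pattern (f_repetitionpattern seq pattern)

-- ===== LEMMAS AND PROOFS =====

def pvPat (pattern : List Int) (i : Int) : Int :=
  (PySem.List.pyGet? pattern (PySem.Int.mod i (pattern.length : Int))).getD 0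
def pvGet (seq : List Int) (j : Int) : Int :=
  (PySem.List.pyGet? seq (PySem.Int.mod j (seq.length : Int))).getD 0

-- the k offsets produced by A starting at j with pattern counter i
def pvOffs (pattern : List Int) : Nat → Int → Int → List Int
  | 0, _, _ => []
  | k+1, i, j => j :: pvOffs pattern k (i + 1) (j + pvPat pattern i)

-- cumulative sum of the cyclic pattern stream after k steps (A's j after k iterations)
def pvSN (pattern : List Int) : Nat → Int
  | 0 => 0
  | k+1 => pvSN pattern k + pvPat pattern (k : Int)

theorem pvA_go_eq (seq pattern : List Int) (k : Nat) (t : List Int) (i j : Int) :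
    f_repetitionpattern_go seq pattern k t i j
      = t ++ (pvOffs pattern k i j).map (pvGet seq) := by
  induction k generalizing t i j with
  | zero => simp [f_repetitionpattern_go, pvOffs]
  | succ k ih => simp [f_repetitionpattern_go, pvOffs, ih, pvGet, pvPat]

theorem pvOffs_spec (pattern : List Int) (K : Nat) :
    ∀ (i : Nat) (j : Int),
      pvOffs pattern K (i : Int) j
        = (List.range K).map (fun k => j + (pvSN pattern (i + k) - pvSN pattern i)) := by
  induction K with
  | zero => intro i j; simp [pvOffs]
  | succ K ih =>
    intro i j
    have hc : (i : Int) + 1 = ((i + 1 : Nat) : Int) := by push_cast; ring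
    rw [show pvOffs pattern (K+1) (i : Int) j
          = j :: pvOffs pattern K ((i : Int) + 1) (j + pvPat pattern (i : Int)) from rfl,
        hc, ih (i+1)]
    rw [List.range_succ_eq_map]
    simp only [List.map_cons, List.map_map]
    congr 1
    · simp
    apply List.map_congr_left
    intro k _
    have h1 : pvSN pattern (i + 1) = pvSN pattern i + pvPat pattern (i : Int) := rfl
    have h2 : i + (k + 1) = (i + 1) + k := by omega
    simp only [Function.comp, Nat.succ_eq_add_one, h2, h1]
    ring

theorem pvOffs_zero_eq (pattern : List Int) (K : Nat) :
    pvOffs pattern K 0 0 = (List.range K).map (fun k => pvSN pattern k) := by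
  have := pvOffs_spec pattern K 0 0
  simp only [Nat.cast_zero, zero_add] at this
  rw [this]
  apply List.map_congr_left
  intro k _
  simp [pvSN]

-- periodicity of the cyclic pattern access
theorem pvPat_period (pattern : List Int) (k : Nat) :
    pvPat pattern ((pattern.length + k : Nat) : Int) = pvPat pattern (k : Int) := by
  unfold pvPat
  rw [PySem.Int.mod_natCast, PySem.Int.mod_natCast, Nat.add_mod_left]

theorem pvSN_add_period (pattern : List Int) (k : Nat) :
    pvSN pattern (pattern.length + k) = pvSN pattern pattern.length + pvSN pattern k := by
  induction k with
  | zero => simp [pvSN]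
  | succ k ih =>
    have h1 : pattern.length + (k + 1) = (pattern.length + k) + 1 := rfl
    rw [h1, show pvSN pattern ((pattern.length + k) + 1)
          = pvSN pattern (pattern.length + k) + pvPat pattern ((pattern.length + k : Nat) : Int) from rfl,
        ih, pvPat_period pattern k]
    rw [show pvSN pattern (k + 1) = pvSN pattern k + pvPat pattern (k : Int) from rfl]
    ring

-- the closed form B uses: cumulative sum after a*m+r steps = a * period-total + prefix sum at r
theorem pvSN_closed (pattern : List Int) (a r : Nat) :
    pvSN pattern (a * pattern.length + r)
      = (a : Int) * pvSN pattern pattern.length + pvSN pattern r := by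
  induction a with
  | zero => simp
  | succ a ih =>
    have h1 : (a + 1) * pattern.length + r = pattern.length + (a * pattern.length + r) := by ring
    rw [h1, pvSN_add_period pattern, ih]
    push_cast
    ring

-- the prefix-sum list built by B's fold
def pvPref (l : List Int) (s : Int) : List Int :=
  match l with
  | [] => []
  | p :: ps => (s + p) :: pvPref ps (s + p)

theorem pvB_fold_eq (l : List Int) (acc : List Int) (s : Int)
    (h : acc.getLast? = some s) :
    l.foldl (fun acc p => acc ++ [(PySem.List.pyGet? acc (-1)).getD 0 + p]) acc
      = acc ++ pvPref l s := by
  induction l generalizing acc s with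
  | nil => simp [pvPref]
  | cons p ps ih =>
    simp only [List.foldl_cons, pvPref]
    rw [ih (acc ++ [(PySem.List.pyGet? acc (-1)).getD 0 + p]) (s + p)
      (by simp [List.getLast?_append, PySem.List.pyGet?_neg_one, h])]
    simp [PySem.List.pyGet?_neg_one, h]

theorem pvPref_eq (l : List Int) (s : Int) :
    pvPref l s = (List.range l.length).map (fun r => s + (l.take (r+1)).sum) := by
  induction l generalizing s with
  | nil => simp [pvPref]
  | cons p ps ih =>
    simp only [pvPref, List.length_cons]
    rw [List.range_succ_eq_map, ih (s + p)]
    simp only [List.map_cons, List.map_map]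
    congr 1
    · simp
    · apply List.map_congr_left
      intro r _
      simp [Function.comp, add_assoc]

-- B's prefix list is the list of one-period partial sums
theorem pvPrefix_eq (pattern : List Int) :
    pattern.foldl (fun acc p => acc ++ [(PySem.List.pyGet? acc (-1)).getD 0 + p]) [0]
      = (List.range (pattern.length + 1)).map (fun r => (pattern.take r).sum) := by
  rw [pvB_fold_eq pattern [0] 0 (by simp), pvPref_eq, List.range_succ_eq_map]
  simp [Function.comp]

-- partial sums of one period are the cumulative sums pvSN (for r ≤ m)
theorem pvTake_sum_eq (pattern : List Int) (r : Nat) (hr : r ≤ pattern.length) :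
    (pattern.take r).sum = pvSN pattern r := by
  induction r with
  | zero => simp [pvSN]
  | succ r ih =>
    have hrl : r < pattern.length := by omega
    rw [List.take_add_one,
        show pvSN pattern (r + 1) = pvSN pattern r + pvPat pattern (r : Int) from rfl]
    simp only [List.sum_append]
    rw [ih (by omega)]
    congr 1
    unfold pvPat
    rw [PySem.Int.mod_natCast, Nat.mod_eq_of_lt hrl]
    simp [PySem.List.pyGet?, PySem.List.pyIdx?, hrl]

-- reading B's prefix list at a valid index
theorem pvPrefix_get (pattern : List Int) (r : Nat) (hr : r ≤ pattern.length) :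
    (PySem.List.pyGet?
      ((List.range (pattern.length + 1)).map (fun r => (pattern.take r).sum))
      (r : Int)).getD 0 = (pattern.take r).sum := by
  have hrl : r < pattern.length + 1 := by omega
  simp [PySem.List.pyGet?, PySem.List.pyIdx?, hr, hrl]

-- ===== VERDICT (by name: the statement is the Claim_ definition above) =====
theorem f_repetitionpattern_spec : Claim_equal_f_repetitionpattern := by
  intro seq pattern _ hpre
  unfold Spec_f_repetitionpattern f_repetitionpattern f_repetitionpattern_alt
  rcases Nat.eq_zero_or_pos seq.length with h | h
  · simp [h, pvA_go_eq, pvOffs]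
  · have hn : seq.length ≠ 0 := by omega
    have hm : pattern ≠ [] := by
      rcases hpre with h0 | h0
      · exact absurd (by simp [h0]) hn
      · exact h0
    have hml : 0 < pattern.length := List.length_pos_iff.mpr hm
    simp only [hn, if_false]
    rw [pvA_go_eq, pvOffs_zero_eq]
    simp only [List.nil_append]
    rw [pvPrefix_eq]
    rw [show PySem.List.pyRange 0 (2 * (seq.length : Int)) 1
          = PySem.List.pyRange 0 ((2 * seq.length : Nat) : Int) 1 by push_cast; ring_nf,
        PySem.List.pyRange_zero_natCast]
    simp only [List.map_map]
    apply List.map_congr_left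
    intro k hk
    simp only [Function.comp]
    rw [PySem.Int.floordiv_natCast k pattern.length, PySem.Int.mod_natCast k pattern.length]
    rw [pvPrefix_get pattern pattern.length (le_refl _),
        pvPrefix_get pattern (k % pattern.length) (le_of_lt (Nat.mod_lt k hml))]
    rw [pvTake_sum_eq pattern pattern.length (le_refl _),
        pvTake_sum_eq pattern (k % pattern.length) (le_of_lt (Nat.mod_lt k hml))]
    unfold pvGet
    congr 1
    conv_lhs => rw [← Nat.div_add_mod k pattern.length, Nat.mul_comm]
    rw [pvSN_closed pattern (k / pattern.length) (k % pattern.length)]
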